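-- pv_equiv track=rewrite | github.com/SilasPDJ/python_learning | PYTHON-de-uma-vez-por-todas/EXERCICIOS/aula61.py | make_list_v2
-- ===== SOURCE A (Python) =====
-- def make_list_v2(ing):
--     ingsplt = ing.split('0')
--     ingsplt.pop(0)
--     newt = list()
--     # UNWANTED
--     for elem in ingsplt:
--         elem = f'0{elem}'
--         newt.append(elem)
--     return newt
-- ===== SOURCE B (Python) =====
-- import re
--
-- def make_list_v2(ing):
--     return re.findall(r'0[^0]*', ing)
-- ===== Notes on version B (the rewrite author's own statement) =====
-- stated objective: idiomatic
-- what changed: Replaces the split/pop/re-prepend loop with a single regex findall scan that directly captures each zero-headed maximal segment.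
import Mathlib
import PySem

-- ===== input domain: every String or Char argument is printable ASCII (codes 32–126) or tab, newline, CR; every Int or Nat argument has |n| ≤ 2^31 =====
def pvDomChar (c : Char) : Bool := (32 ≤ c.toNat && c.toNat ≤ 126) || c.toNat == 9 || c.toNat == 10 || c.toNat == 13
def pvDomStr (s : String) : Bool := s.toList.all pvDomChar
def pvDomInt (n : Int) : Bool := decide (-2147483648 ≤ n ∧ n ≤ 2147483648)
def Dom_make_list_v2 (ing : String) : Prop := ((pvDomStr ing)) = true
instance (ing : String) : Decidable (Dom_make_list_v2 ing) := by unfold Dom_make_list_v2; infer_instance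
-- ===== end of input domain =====

-- B replaces A's split/pop/re-prepend loop with one regex scan (re.findall(r'0[^0]*')) for idiomatic brevity.


-- ===== PORT A =====
-- ing.split('0') (exact via PySem.Chars.splitOn; split always returns a nonempty list, so
-- pop(0) never raises — the [] arm below is unreachable), then the append loop as a foldl.
def make_list_v2 (ing : String) : List String :=
  let ingsplt := (PySem.Chars.splitOn ing.toList "0".toList).map String.ofList
  match ingsplt with
  | [] => []  -- unreachable: splitOn never returns []
  | _ :: rest => rest.foldl (fun newt elem => newt ++ ["0" ++ elem]) []

-- ===== PORT B =====
-- re.findall(r'0[^0]*', ing): one left-to-right scan; at each '0' capture the '0' plus the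
-- following maximal run of non-'0' characters, skip other characters. (No regex engine in
-- Lean; this recursion is exactly the matches of that pattern, in order.)
def pvFindall0 : List Char → List String
  | [] => []
  | c :: rest =>
    if c = '0' then
      String.ofList ('0' :: rest.takeWhile (· ≠ '0')) :: pvFindall0 (rest.dropWhile (· ≠ '0'))
    else
      pvFindall0 rest
termination_by l => l.length
decreasing_by
  · exact Nat.lt_succ_of_le (List.length_dropWhile_le _ _)
  · exact Nat.lt_succ_self _

def make_list_v2_alt (ing : String) : List String := pvFindall0 ing.toList

-- ===== PRECONDITION & SPEC =====
def Spec_make_list_v2 (ing : String) (out : List String) : Prop := out = make_list_v2_alt ing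
instance (ing : String) (out : List String) : Decidable (Spec_make_list_v2 ing out) := by unfold Spec_make_list_v2; infer_instance

-- ===== CLAIM (what is proved, stated in full; the proofs are below) =====
def Claim_equal_make_list_v2 : Prop := ∀ (ing : String), Dom_make_list_v2 ing → Spec_make_list_v2 ing (make_list_v2 ing)

-- ===== LEMMAS AND PROOFS =====

-- the pieces that follow the first '0' (each is the maximal non-'0' run after one '0')
def pvPieces : List Char → List (List Char)
  | [] => []
  | c :: rest =>
    if c = '0' then
      rest.takeWhile (· ≠ '0') :: pvPieces (rest.dropWhile (· ≠ '0'))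
    else
      pvPieces rest
termination_by l => l.length
decreasing_by
  · exact Nat.lt_succ_of_le (List.length_dropWhile_le _ _)
  · exact Nat.lt_succ_self _

lemma pvGo_spec : ∀ (fuel : Nat) (l cur : List Char) (acc : List (List Char)), l.length < fuel →
    PySem.Chars.splitOn.go ['0'] fuel l cur acc
      = acc.reverse ++ (cur.reverse ++ l.takeWhile (· ≠ '0')) :: pvPieces (l.dropWhile (· ≠ '0')) := by
  intro fuel
  induction fuel with
  | zero => intro l cur acc h; omega
  | succ fuel ih =>
    intro l cur acc h
    match l with
    | [] =>
      rw [PySem.Chars.splitOn.go.eq_2 _ _ _ _ (by omega)]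
      simp [pvPieces]
    | c :: rest =>
      rw [show fuel + 1 = fuel.succ from rfl, PySem.Chars.splitOn.go.eq_3]
      by_cases hc : c = '0'
      · subst hc
        have hpre : List.isPrefixOf ['0'] ('0' :: rest) = true := by
          simp [List.isPrefixOf]
        rw [if_pos hpre]
        rw [show List.drop (['0'] : List Char).length ('0' :: rest) = rest from rfl]
        rw [ih rest [] (cur.reverse :: acc) (by simpa using Nat.lt_of_succ_lt_succ h)]
        simp [pvPieces, List.takeWhile, List.dropWhile]
      · have hpre : List.isPrefixOf ['0'] (c :: rest) = false := by
          simp [List.isPrefixOf]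
          exact fun h' => hc h'.symm
        rw [if_neg (by simp [hpre])]
        rw [ih rest (c :: cur) acc (by simpa using Nat.lt_of_succ_lt_succ h)]
        simp [List.takeWhile, List.dropWhile, hc]

lemma pvDropWhile_idem (l : List Char) :
    (l.dropWhile (· ≠ '0')).dropWhile (· ≠ '0') = l.dropWhile (· ≠ '0') := by
  induction l with
  | nil => rfl
  | cons c rest ih =>
    by_cases hc : c = '0'
    · subst hc; simp [List.dropWhile]
    · simpa [List.dropWhile, hc] using ih

lemma pvFindall0_eq_pieces : ∀ (l : List Char),
    pvFindall0 l = (pvPieces (l.dropWhile (· ≠ '0'))).map (fun p => String.ofList ('0' :: p)) := by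
  intro l
  induction hn : l.length using Nat.strong_induction_on generalizing l with
  | _ n ih =>
    match l with
    | [] => simp [pvFindall0, pvPieces]
    | c :: rest =>
      by_cases hc : c = '0'
      · subst hc
        rw [pvFindall0]
        have hlen : (rest.dropWhile (· ≠ '0')).length < n := by
          have h1 := List.length_dropWhile_le (fun x => decide (x ≠ '0')) rest
          simp at hn
          omega
        rw [ih _ hlen _ rfl, pvDropWhile_idem]
        simp [List.dropWhile, pvPieces]
      · rw [pvFindall0]
        rw [if_neg hc]
        have hlen : rest.length < n := by simp at hn; omega
        rw [ih _ hlen _ rfl]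
        simp [List.dropWhile, hc]

lemma pvFoldl_append_map (xs : List String) (acc : List String) :
    xs.foldl (fun newt elem => newt ++ ["0" ++ elem]) acc = acc ++ xs.map (fun e => "0" ++ e) := by
  induction xs generalizing acc with
  | nil => simp
  | cons x xs ih => simp [List.foldl, ih, List.append_assoc]

lemma pvStr_zero_append (p : List Char) : "0" ++ String.ofList p = String.ofList ('0' :: p) := by
  apply String.ext
  simp

-- ===== VERDICT (by name: the statement is the Claim_ definition above) =====
theorem make_list_v2_spec : Claim_equal_make_list_v2 := by
  intro ing _
  unfold Spec_make_list_v2 make_list_v2 make_list_v2_alt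
  rw [show ("0" : String).toList = ['0'] from rfl]
  unfold PySem.Chars.splitOn
  rw [pvGo_spec _ _ _ _ (Nat.lt_succ_self _)]
  simp only [List.reverse_nil, List.nil_append, List.map_cons]
  rw [pvFoldl_append_map, pvFindall0_eq_pieces]
  simp [Function.comp, pvStr_zero_append]
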